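-- pv_equiv track=rewrite | github.com/kanitsch/ASD | ubiegle_lata/offline_2022_23_zrobione/zad3/zad3.py | strong_string_n2
-- ===== SOURCE A (Python) =====
-- def strong_string_n2(T):
--     n=len(T)
--     maxx=1
--     for i in range(n):
--         strength=1
--         for j in range(i+1,n):
--             if T[i]==T[j] or T[i]==T[j][::-1]:
--                 strength+=1
--             maxx=max(maxx,strength)
--     return maxx
-- ===== SOURCE B (Python) =====
-- def strong_string_n2(T):
--     best = 1
--     counts = {}
--     for s in reversed(T):
--         k = min(s, s[::-1])
--         c = counts.get(k, 0) + 1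
--         counts[k] = c
--         if c > best:
--             best = c
--     return best
-- ===== Notes on version B (the rewrite author's own statement) =====
-- stated objective: faster
-- what changed: Replaces the O(n^2) pairwise comparison loops by one right-to-left pass that counts frequencies of the canonical key min(s, s[::-1]) in a hash map and tracks the running maximum.
import Mathlib
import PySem

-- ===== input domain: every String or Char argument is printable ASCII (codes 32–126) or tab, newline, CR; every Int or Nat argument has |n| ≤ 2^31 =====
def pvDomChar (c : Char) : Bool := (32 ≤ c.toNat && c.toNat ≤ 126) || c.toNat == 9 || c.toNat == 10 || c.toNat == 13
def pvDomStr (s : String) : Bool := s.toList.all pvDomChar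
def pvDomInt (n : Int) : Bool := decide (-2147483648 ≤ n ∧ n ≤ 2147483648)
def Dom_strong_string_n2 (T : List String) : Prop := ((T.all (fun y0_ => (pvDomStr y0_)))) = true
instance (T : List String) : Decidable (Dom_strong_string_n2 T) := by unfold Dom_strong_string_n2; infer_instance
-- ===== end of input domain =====

-- B replaces A's O(n^2) pairwise scan by one pass counting the canonical key min(s, s[::-1]) in a hash map (objective: faster).

-- s[::-1] (shared by both Pythons)
def pyRev (s : String) : String := (PySem.Str.slice? s none none (-1)).getD ""

-- ===== PORT A =====
-- indices produced by range(n) / range(i+1, n) are always in range, so pyGetD is exact for T[i] / T[j]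
def strong_string_n2 (T : List String) : Int :=
  let n : Int := PySem.List.len T
  (PySem.List.pyRange 0 n 1).foldl
    (fun maxx i =>
      ((PySem.List.pyRange (i + 1) n 1).foldl
        (fun (p : Int × Int) j =>
          let strength :=
            if PySem.List.pyGetD T i "" = PySem.List.pyGetD T j ""
               ∨ PySem.List.pyGetD T i "" = pyRev (PySem.List.pyGetD T j "") then p.1 + 1 else p.1
          (strength, max p.2 strength))
        (1, maxx)).2)
    1

-- ===== PORT B =====
-- Python min(s, s[::-1]) on two strings: the lexicographically smaller, the first on a tie
def canonKey (s : String) : String := min s (pyRev s)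

def strong_string_n2_alt (T : List String) : Int :=
  (T.reverse.foldl
    (fun (st : Int × PySem.Dict String Int) s =>
      let k := canonKey s
      let c := st.2.getD k 0 + 1
      (if c > st.1 then c else st.1, st.2.insert k c))
    (1, PySem.Dict.empty)).1

-- ===== PRECONDITION & SPEC =====
def Spec_strong_string_n2 (T : List String) (out : Int) : Prop := out = strong_string_n2_alt T
instance (T : List String) (out : Int) : Decidable (Spec_strong_string_n2 T out) := by unfold Spec_strong_string_n2; infer_instance

-- ===== CLAIM (what is proved, stated in full; the proofs are below) =====
def Claim_equal_strong_string_n2 : Prop := ∀ (T : List String), Dom_strong_string_n2 T → Spec_strong_string_n2 T (strong_string_n2 T)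

-- ===== LEMMAS AND PROOFS =====

-- number of elements of L whose canonical key is k
def cntKey (L : List String) (k : String) : Int :=
  ((L.countP (fun t => decide (canonKey t = k))) : Int)

-- reference value: max over suffixes of (key-count of the suffix's head in that suffix), at least 1
def refMax : List String → Int
  | [] => 1
  | s :: rest => max (refMax rest) (cntKey (s :: rest) (canonKey s))

theorem pyRev_pyRev (s : String) : pyRev (pyRev s) = s := by
  simp [pyRev, PySem.Str.slice?_none_none_neg_one]

theorem canonKey_pyRev (s : String) : canonKey (pyRev s) = canonKey s := by
  rw [canonKey, canonKey, pyRev_pyRev, min_comm]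

theorem canonKey_eq_iff (s t : String) :
    canonKey s = canonKey t ↔ (s = t ∨ s = pyRev t) := by
  constructor
  · intro h
    rw [canonKey, canonKey] at h
    rcases min_choice s (pyRev s) with hs | hs <;> rw [hs] at h <;>
      rcases min_choice t (pyRev t) with ht | ht <;> rw [ht] at h
    · exact Or.inl h
    · exact Or.inr h
    · right; have := congrArg pyRev h; rwa [pyRev_pyRev] at this
    · left; have := congrArg pyRev h; rwa [pyRev_pyRev, pyRev_pyRev] at this
  · rintro (rfl | rfl)
    · rfl
    · exact canonKey_pyRev t

theorem cntKey_cons (s : String) (rest : List String) (k : String) :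
    cntKey (s :: rest) k = cntKey rest k + (if canonKey s = k then 1 else 0) := by
  simp only [cntKey, List.countP_cons]
  split_ifs <;> simp_all

theorem if_gt_eq_max (b c : Int) : (if c > b then c else b) = max b c := by
  split_ifs <;> omega

-- ===== B = refMax =====

theorem alt_foldr_inv (L : List String) :
    (L.foldr
      (fun s (st : Int × PySem.Dict String Int) =>
        let k := canonKey s
        let c := st.2.getD k 0 + 1
        (if c > st.1 then c else st.1, st.2.insert k c))
      (1, PySem.Dict.empty)).1 = refMax L
    ∧ ∀ k, (L.foldr
      (fun s (st : Int × PySem.Dict String Int) =>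
        let k := canonKey s
        let c := st.2.getD k 0 + 1
        (if c > st.1 then c else st.1, st.2.insert k c))
      (1, PySem.Dict.empty)).2.getD k 0 = cntKey L k := by
  induction L with
  | nil =>
    refine ⟨by simp [refMax], fun k => ?_⟩
    simp [pysem, cntKey, PySem.Dict.empty]
  | cons s rest ih =>
    obtain ⟨ih1, ih2⟩ := ih
    constructor
    · simp only [List.foldr_cons]
      rw [if_gt_eq_max, ih1, ih2, refMax, cntKey_cons, if_pos rfl]
    · intro k
      simp only [List.foldr_cons, PySem.Dict.getD_insert, ih2]
      rw [cntKey_cons]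
      by_cases h : canonKey s = k
      · rw [if_pos h.symm, if_pos h, h]
      · rw [if_neg (fun hk => h hk.symm), if_neg h, add_zero]

theorem alt_eq_refMax (T : List String) : strong_string_n2_alt T = refMax T := by
  rw [strong_string_n2_alt, List.foldl_reverse]
  exact (alt_foldr_inv T).1

-- ===== A = refMax =====

-- A's inner loop: running max of a nondecreasing strength is its final value
theorem innerA (C : Int → Prop) [DecidablePred C] (js : List Int) :
    ∀ (s0 m0 : Int),
    (js.foldl
      (fun (p : Int × Int) j =>
        let strength := if C j then p.1 + 1 else p.1
        (strength, max p.2 strength))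
      (s0, m0))
    = (s0 + ((js.countP (fun j => decide (C j))) : Int),
       if js = [] then m0 else max m0 (s0 + ((js.countP (fun j => decide (C j))) : Int))) := by
  induction js with
  | nil => intro s0 m0; simp
  | cons j rest ih =>
    intro s0 m0
    have hc : (0 : Int) ≤ (rest.countP (fun j => decide (C j)) : Int) := by positivity
    by_cases h : C j
    · simp only [List.foldl_cons, ih, List.countP_cons, h, decide_true,
        if_true, List.cons_ne_nil, if_false]
      rcases eq_or_ne rest ([] : List Int) with hr | hr
      · simp [hr]
      · rw [if_neg hr]
        simp only [Prod.mk.injEq]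
        push_cast
        constructor <;> omega
    · simp only [List.foldl_cons, ih, List.countP_cons, h, decide_false,
        if_false, List.cons_ne_nil]
      rcases eq_or_ne rest ([] : List Int) with hr | hr
      · simp [hr]
      · rw [if_neg hr]
        simp only [Prod.mk.injEq, Bool.false_eq_true, if_false]
        constructor <;> omega

theorem count_inner (T : List String) (i : Int) (h0 : 0 ≤ i) (hlt : i.toNat < T.length) :
    1 + (((PySem.List.pyRange (i + 1) (PySem.List.len T) 1).countP
        (fun j => decide (PySem.List.pyGetD T i "" = PySem.List.pyGetD T j ""
          ∨ PySem.List.pyGetD T i "" = pyRev (PySem.List.pyGetD T j "")))) : Int)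
    = cntKey (T.drop i.toNat) (canonKey (PySem.List.pyGetD T i "")) := by
  have hmap := PySem.List.map_pyGetD_pyRange T "" (a := i + 1) (by omega)
  have hcnt : (PySem.List.pyRange (i + 1) (PySem.List.len T) 1).countP
        (fun j => decide (PySem.List.pyGetD T i "" = PySem.List.pyGetD T j ""
          ∨ PySem.List.pyGetD T i "" = pyRev (PySem.List.pyGetD T j "")))
      = (T.drop (i + 1).toNat).countP
          (fun t => decide (canonKey t = canonKey (PySem.List.pyGetD T i ""))) := by
    rw [← hmap, List.countP_map]
    apply List.countP_congr
    intro j _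
    simp only [Function.comp_apply, decide_eq_true_eq]
    rw [canonKey_eq_iff]
    constructor
    · rintro (h | h)
      · exact Or.inl h.symm
      · right; have := congrArg pyRev h; rwa [pyRev_pyRev, eq_comm] at this
    · rintro (h | h)
      · exact Or.inl h.symm
      · right; have := congrArg pyRev h; rwa [pyRev_pyRev, eq_comm] at this
  have hti : PySem.List.pyGetD T i "" = T[i.toNat] := by
    rw [PySem.List.pyGetD_of_nonneg T "" h0]
    exact List.getD_eq_getElem T "" hlt
  have h1 : (i + 1).toNat = i.toNat + 1 := by omega
  rw [hcnt, h1]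
  simp only [cntKey]
  rw [List.drop_eq_getElem_cons hlt, List.countP_cons]
  have hhead : (decide (canonKey T[i.toNat] = canonKey (PySem.List.pyGetD T i ""))) = true := by
    rw [hti]; exact decide_eq_true rfl
  rw [hhead]
  simp
  omega

-- hoisting a running max: the initial max factors out
theorem foldl_max_hoist {ι : Type} (a : ι → Int) :
    ∀ (l : List ι) (x y : Int),
    l.foldl (fun m k => max m (a k)) (max x y) = max x (l.foldl (fun m k => max m (a k)) y) := by
  intro l
  induction l with
  | nil => intro x y; rfl
  | cons k rest ih =>
    intro x y
    simp only [List.foldl_cons]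
    rw [max_assoc]
    exact ih x (max y (a k))

-- the reference fold with Nat indices equals refMax
theorem natfold_eq : ∀ (T : List String),
    (List.range T.length).foldl
      (fun m (k : Nat) => max m (cntKey (T.drop k) (canonKey (T.getD k "")))) 1 = refMax T := by
  intro T
  induction T with
  | nil => rfl
  | cons s rest ih =>
    rw [List.length_cons, List.range_succ_eq_map, List.foldl_cons, List.foldl_map]
    simp only [List.drop_succ_cons, List.getD_cons_succ, List.drop_zero, List.getD_cons_zero,
      Nat.succ_eq_add_one]
    rw [max_comm 1 _, foldl_max_hoist (fun k => cntKey (rest.drop k) (canonKey (rest.getD k ""))), ih]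
    rw [refMax, max_comm]

-- per-index value of the reference fold (Int indices, as A's outer loop produces them)
def gStep (T : List String) (m : Int) (i : Int) : Int :=
  max m (cntKey (T.drop i.toNat) (canonKey (PySem.List.pyGetD T i "")))

theorem gfold_eq (T : List String) :
    (PySem.List.pyRange 0 (PySem.List.len T) 1).foldl (gStep T) 1 = refMax T := by
  have hr : PySem.List.pyRange 0 (PySem.List.len T) 1
      = (List.range T.length).map (fun (k : Nat) => (k : Int)) := by
    rw [PySem.List.pyRange_one]
    simp only [sub_zero, PySem.List.len_eq, Int.toNat_natCast, zero_add]
  rw [hr, List.foldl_map, ← natfold_eq T]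
  apply PySem.List.foldl_congr_mem
  intro acc k _
  simp only [gStep, PySem.List.pyGetD_natCast, Int.toNat_natCast]

theorem a_eq_refMax (T : List String) : strong_string_n2 T = refMax T := by
  have hlen : PySem.List.len T = (T.length : Int) := PySem.List.len_eq T
  rcases eq_or_ne T ([] : List String) with hT | hT
  · subst hT; rfl
  have hn : 1 ≤ (T.length : Int) := by
    have : T.length ≠ 0 := fun h => hT (List.eq_nil_of_length_eq_zero h)
    omega
  rw [strong_string_n2]
  simp only [hlen]
  -- collapse each inner loop with innerA
  have hinner : ∀ (maxx i : Int),
      ((PySem.List.pyRange (i + 1) (T.length : Int) 1).foldl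
        (fun (p : Int × Int) j =>
          let strength :=
            if PySem.List.pyGetD T i "" = PySem.List.pyGetD T j ""
               ∨ PySem.List.pyGetD T i "" = pyRev (PySem.List.pyGetD T j "") then p.1 + 1 else p.1
          (strength, max p.2 strength))
        (1, maxx)).2
      = (if PySem.List.pyRange (i + 1) (T.length : Int) 1 = [] then maxx
         else max maxx (1 + (((PySem.List.pyRange (i + 1) (T.length : Int) 1).countP
            (fun j => decide (PySem.List.pyGetD T i "" = PySem.List.pyGetD T j ""
              ∨ PySem.List.pyGetD T i "" = pyRev (PySem.List.pyGetD T j "")))) : Int))) := by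
    intro maxx i
    rw [innerA (fun j => PySem.List.pyGetD T i "" = PySem.List.pyGetD T j ""
          ∨ PySem.List.pyGetD T i "" = pyRev (PySem.List.pyGetD T j ""))]
  simp only [hinner]
  -- split off the last index
  have hsplit : PySem.List.pyRange 0 (T.length : Int) 1
      = PySem.List.pyRange 0 ((T.length : Int) - 1) 1 ++ [(T.length : Int) - 1] := by
    rw [PySem.List.pyRange_one_append 0 ((T.length : Int) - 1) (T.length : Int) (by omega) (by omega)]
    congr 1
    have := PySem.List.pyRange_one_singleton ((T.length : Int) - 1)
    rwa [show (T.length : Int) - 1 + 1 = (T.length : Int) by ring] at this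
  have hcong : ∀ (acc : Int), ∀ i ∈ PySem.List.pyRange 0 ((T.length : Int) - 1) 1,
      (if PySem.List.pyRange (i + 1) (T.length : Int) 1 = [] then acc
       else max acc (1 + (((PySem.List.pyRange (i + 1) (T.length : Int) 1).countP
          (fun j => decide (PySem.List.pyGetD T i "" = PySem.List.pyGetD T j ""
            ∨ PySem.List.pyGetD T i "" = pyRev (PySem.List.pyGetD T j "")))) : Int)))
      = gStep T acc i := by
    intro acc i hi
    rw [PySem.List.mem_pyRange_one] at hi
    have hne : PySem.List.pyRange (i + 1) (T.length : Int) 1 ≠ [] := by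
      rw [PySem.List.pyRange_one_cons (by omega)]
      exact List.cons_ne_nil _ _
    rw [if_neg hne, gStep, ← hlen, count_inner T i (by omega) (by omega)]
  rw [hsplit, List.foldl_append,
      PySem.List.foldl_congr_mem _ _ (gStep T) 1 hcong]
  set P := (PySem.List.pyRange 0 ((T.length : Int) - 1) 1).foldl (gStep T) 1 with hP
  have hPge : 1 ≤ P := by
    have := (PySem.List.le_foldl_max_int (PySem.List.pyRange 0 ((T.length : Int) - 1) 1)
      (fun i => cntKey (T.drop i.toNat) (canonKey (PySem.List.pyGetD T i ""))) 1).1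
    simpa [hP, gStep] using this
  have hlast : ((T.length : Int) - 1).toNat < T.length := by omega
  have hone : cntKey (T.drop ((T.length : Int) - 1).toNat)
      (canonKey (PySem.List.pyGetD T ((T.length : Int) - 1) "")) = 1 := by
    have hdropnil : T.drop (((T.length : Int) - 1).toNat + 1) = [] := by
      apply List.drop_eq_nil_of_le; omega
    have hti : PySem.List.pyGetD T ((T.length : Int) - 1) "" = T[((T.length : Int) - 1).toNat] := by
      rw [PySem.List.pyGetD_of_nonneg T "" (by omega)]
      exact List.getD_eq_getElem T "" hlast
    simp only [cntKey]
    rw [List.drop_eq_getElem_cons hlast, hdropnil, List.countP_cons, hti]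
    simp
  have href : refMax T = max P 1 := by
    rw [← gfold_eq T, hlen, hsplit, List.foldl_append]
    simp only [List.foldl_cons, List.foldl_nil]
    rw [← hP, gStep, hone]
  simp only [List.foldl_cons, List.foldl_nil]
  rw [if_pos (PySem.List.pyRange_one_eq_nil (by omega)), href]
  omega

-- ===== VERDICT (by name: the statement is the Claim_ definition above) =====
theorem strong_string_n2_spec : Claim_equal_strong_string_n2 := by
  intro T _
  unfold Spec_strong_string_n2
  rw [a_eq_refMax, alt_eq_refMax]
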